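-- pv_equiv track=rewrite | github.com/sjakati98/PixelLinkCharacter | DataWrangling/crop_character_annotations.py | check_box_in_crop
-- ===== SOURCE A (Python) =====
-- def check_box_in_crop(box_coordinates, crop_x, crop_y, crop_width=512, crop_height=512):
-- 	"""
-- 		Inputs:
-- 		- box_coordinates: List[(Int, Int)]; the 4 coordinate tuples
-- 		- crop_x: Int; top-left x coordinate of the crop
-- 		- crop_y: Int; top-left y coordinate of the crop
-- 		- crop_width: Int; width of the crop window
-- 		- crop_height: Int; height of the crop window
-- 		Outputs:
-- 		- relative_coordinates: List[(Int, Int)]; returns 4 coordinate tuples of the relative_coordinates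
-- 			- **returns None if the original box_coordinates are not completely within the crop**
-- 	"""
-- 	crop_x_max = crop_x + crop_width
-- 	crop_y_max = crop_y + crop_height
--
-- 	relative_coordinates = []
--
-- 	for i, coordinate_pair in enumerate(box_coordinates):
-- 		coordinate_x = coordinate_pair[0]
-- 		coordinate_y = coordinate_pair[1]
-- 		if crop_x <= coordinate_x <= crop_x_max and crop_y <= coordinate_y <= crop_y_max:
-- 			relative_x = int(coordinate_x - crop_x)
-- 			relative_y = int(coordinate_y - crop_y)
-- 			relative_coordinates.append((relative_x, relative_y))
-- 		else:
-- 			return None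
--
-- 	return relative_coordinates
-- ===== SOURCE B (Python) =====
-- def check_box_in_crop(box_coordinates, crop_x, crop_y, crop_width=512, crop_height=512):
--     if not box_coordinates:
--         return []
--     xs = [p[0] for p in box_coordinates]
--     ys = [p[1] for p in box_coordinates]
--     if (min(xs) < crop_x or max(xs) > crop_x + crop_width
--             or min(ys) < crop_y or max(ys) > crop_y + crop_height):
--         return None
--     return [(int(x - crop_x), int(y - crop_y)) for x, y in box_coordinates]
-- ===== Notes on version B (the rewrite author's own statement) =====
-- stated objective: alternative
-- what changed: Instead of testing each point against the window (A's fused check-and-build loop with early return), B aggregates the box into its bounding box (min/max of x and y coordinates) and compares only those four extremes against the crop window, then maps to relative coordinates; all points lie in the window iff the bounding box does.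
import Mathlib
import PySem

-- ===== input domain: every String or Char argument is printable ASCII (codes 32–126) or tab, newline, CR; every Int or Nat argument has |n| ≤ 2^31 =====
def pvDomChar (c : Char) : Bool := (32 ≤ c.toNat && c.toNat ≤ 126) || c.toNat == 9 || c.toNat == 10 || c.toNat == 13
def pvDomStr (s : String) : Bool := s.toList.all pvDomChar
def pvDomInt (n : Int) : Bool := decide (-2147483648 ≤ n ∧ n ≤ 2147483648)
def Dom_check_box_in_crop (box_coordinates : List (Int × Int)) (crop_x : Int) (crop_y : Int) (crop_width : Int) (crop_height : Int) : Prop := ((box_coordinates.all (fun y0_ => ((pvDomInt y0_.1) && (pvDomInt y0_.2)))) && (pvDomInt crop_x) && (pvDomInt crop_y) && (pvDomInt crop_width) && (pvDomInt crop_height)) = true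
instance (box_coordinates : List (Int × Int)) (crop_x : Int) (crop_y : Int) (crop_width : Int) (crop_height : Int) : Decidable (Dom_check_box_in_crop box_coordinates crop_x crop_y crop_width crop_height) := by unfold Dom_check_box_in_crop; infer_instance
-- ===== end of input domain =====

-- B replaces A's per-point check-and-build loop (early return) by a bounding-box aggregation: min/max of x and y compared once against the window, then a map; alternative algorithm, same cost.


-- ===== PORT A =====
-- A's for-loop: appends the relative pair while in bounds, returns None at the first
-- out-of-bounds pair (Python's int(x - crop_x) on ints is x - crop_x).
def check_box_in_crop_loop (crop_x crop_y crop_x_max crop_y_max : Int)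
    (acc : List (Int × Int)) : List (Int × Int) → Option (List (Int × Int))
  | [] => some acc
  | p :: rest =>
    if crop_x ≤ p.1 ∧ p.1 ≤ crop_x_max ∧ crop_y ≤ p.2 ∧ p.2 ≤ crop_y_max then
      check_box_in_crop_loop crop_x crop_y crop_x_max crop_y_max
        (acc ++ [(p.1 - crop_x, p.2 - crop_y)]) rest
    else
      none

def check_box_in_crop (box_coordinates : List (Int × Int)) (crop_x : Int) (crop_y : Int) (crop_width : Int) (crop_height : Int) : Option (List (Int × Int)) :=
  let crop_x_max := crop_x + crop_width
  let crop_y_max := crop_y + crop_height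
  check_box_in_crop_loop crop_x crop_y crop_x_max crop_y_max [] box_coordinates

-- ===== PORT B =====
-- bounding-box aggregation: min/max over the x and y projections (PySem.List.min?/max?
-- = Python min/max on a nonempty list), four comparisons, then a map.
def check_box_in_crop_alt (box_coordinates : List (Int × Int)) (crop_x : Int) (crop_y : Int) (crop_width : Int) (crop_height : Int) : Option (List (Int × Int)) :=
  if box_coordinates = [] then some []
  else
    let xs := box_coordinates.map Prod.fst
    let ys := box_coordinates.map Prod.snd
    match PySem.List.min? xs (fun v => v), PySem.List.max? xs (fun v => v),
          PySem.List.min? ys (fun v => v), PySem.List.max? ys (fun v => v) with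
    | some mnx, some mxx, some mny, some mxy =>
      if mnx < crop_x ∨ mxx > crop_x + crop_width ∨ mny < crop_y ∨ mxy > crop_y + crop_height then
        none
      else
        some (box_coordinates.map fun p => (p.1 - crop_x, p.2 - crop_y))
    | _, _, _, _ => none  -- unreachable: the list is nonempty here

-- ===== PRECONDITION & SPEC =====
def Spec_check_box_in_crop (box_coordinates : List (Int × Int)) (crop_x : Int) (crop_y : Int) (crop_width : Int) (crop_height : Int) (out : Option (List (Int × Int))) : Prop := out = check_box_in_crop_alt box_coordinates crop_x crop_y crop_width crop_height
instance (box_coordinates : List (Int × Int)) (crop_x : Int) (crop_y : Int) (crop_width : Int) (crop_height : Int) (out : Option (List (Int × Int))) : Decidable (Spec_check_box_in_crop box_coordinates crop_x crop_y crop_width crop_height out) := by unfold Spec_check_box_in_crop; infer_instance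

-- ===== CLAIM =====
def Claim_equal_check_box_in_crop : Prop := ∀ (box_coordinates : List (Int × Int)) (crop_x : Int) (crop_y : Int) (crop_width : Int) (crop_height : Int), Dom_check_box_in_crop box_coordinates crop_x crop_y crop_width crop_height → Spec_check_box_in_crop box_coordinates crop_x crop_y crop_width crop_height (check_box_in_crop box_coordinates crop_x crop_y crop_width crop_height)

-- ===== LEMMAS AND PROOFS =====
-- Loop invariant: A's loop equals "check all, then acc ++ mapped list".
theorem loop_eq (crop_x crop_y crop_x_max crop_y_max : Int)
    (l : List (Int × Int)) :
    ∀ acc, check_box_in_crop_loop crop_x crop_y crop_x_max crop_y_max acc l =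
      if l.all (fun p => decide (crop_x ≤ p.1 ∧ p.1 ≤ crop_x_max ∧ crop_y ≤ p.2 ∧ p.2 ≤ crop_y_max)) then
        some (acc ++ l.map fun p => (p.1 - crop_x, p.2 - crop_y))
      else none := by
  induction l with
  | nil => intro acc; simp [check_box_in_crop_loop]
  | cons p rest ih =>
    intro acc
    simp only [check_box_in_crop_loop, List.all_cons, List.map_cons]
    by_cases h : crop_x ≤ p.1 ∧ p.1 ≤ crop_x_max ∧ crop_y ≤ p.2 ∧ p.2 ≤ crop_y_max
    · rw [if_pos h, ih, decide_eq_true h, Bool.true_and]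
      simp
    · simp [h]

-- Bounding box vs per-point check: on a nonempty list, every point lies in the window
-- iff the four extremes do.
theorem bbox_iff (bc : List (Int × Int)) (cx cy mx my : Int)
    (mnx mxx mny mxy : Int)
    (h1 : PySem.List.min? (bc.map Prod.fst) (fun v => v) = some mnx)
    (h2 : PySem.List.max? (bc.map Prod.fst) (fun v => v) = some mxx)
    (h3 : PySem.List.min? (bc.map Prod.snd) (fun v => v) = some mny)
    (h4 : PySem.List.max? (bc.map Prod.snd) (fun v => v) = some mxy) :
    (bc.all (fun p => decide (cx ≤ p.1 ∧ p.1 ≤ mx ∧ cy ≤ p.2 ∧ p.2 ≤ my)) = true)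
      ↔ ¬ (mnx < cx ∨ mxx > mx ∨ mny < cy ∨ mxy > my) := by
  have m1 := PySem.List.min?_mem h1
  have m2 := PySem.List.max?_mem h2
  have m3 := PySem.List.min?_mem h3
  have m4 := PySem.List.max?_mem h4
  have o1 := PySem.List.min?_isMin h1
  have o2 := PySem.List.max?_isMax h2
  have o3 := PySem.List.min?_isMin h3
  have o4 := PySem.List.max?_isMax h4
  simp only [List.mem_map] at m1 m2 m3 m4
  obtain ⟨p1, hp1, e1⟩ := m1
  obtain ⟨p2, hp2, e2⟩ := m2
  obtain ⟨p3, hp3, e3⟩ := m3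
  obtain ⟨p4, hp4, e4⟩ := m4
  simp only [List.all_eq_true, decide_eq_true_eq]
  constructor
  · intro hall
    push Not
    refine ⟨?_, ?_, ?_, ?_⟩
    · exact e1 ▸ (hall p1 hp1).1
    · exact e2 ▸ (hall p2 hp2).2.1
    · exact e3 ▸ (hall p3 hp3).2.2.1
    · exact e4 ▸ (hall p4 hp4).2.2.2
  · intro h p hp
    push Not at h
    obtain ⟨a1, a2, a3, a4⟩ := h
    have b1 := o1 p.1 (List.mem_map.2 ⟨p, hp, rfl⟩)
    have b2 := o2 p.1 (List.mem_map.2 ⟨p, hp, rfl⟩)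
    have b3 := o3 p.2 (List.mem_map.2 ⟨p, hp, rfl⟩)
    have b4 := o4 p.2 (List.mem_map.2 ⟨p, hp, rfl⟩)
    simp only at b1 b2 b3 b4
    exact ⟨le_trans a1 b1, le_trans b2 a2, le_trans a3 b3, le_trans b4 a4⟩

-- ===== VERDICT =====
theorem check_box_in_crop_spec : Claim_equal_check_box_in_crop := by
  intro bc cx cy cw ch _
  unfold Spec_check_box_in_crop check_box_in_crop check_box_in_crop_alt
  simp only [loop_eq, List.nil_append]
  by_cases hnil : bc = []
  · subst hnil; simp
  · rw [if_neg hnil]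
    have hx : bc.map Prod.fst ≠ [] := by simpa using hnil
    have hy : bc.map Prod.snd ≠ [] := by simpa using hnil
    obtain ⟨mnx, h1⟩ : ∃ m, PySem.List.min? (bc.map Prod.fst) (fun v : Int => v) = some m := by
      cases e : PySem.List.min? (bc.map Prod.fst) (fun v : Int => v) with
      | none => exact absurd ((PySem.List.min?_eq_none_iff _ _).1 e) hx
      | some m => exact ⟨m, rfl⟩
    obtain ⟨mxx, h2⟩ : ∃ m, PySem.List.max? (bc.map Prod.fst) (fun v : Int => v) = some m := by
      cases e : PySem.List.max? (bc.map Prod.fst) (fun v : Int => v) with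
      | none => exact absurd ((PySem.List.max?_eq_none_iff _ _).1 e) hx
      | some m => exact ⟨m, rfl⟩
    obtain ⟨mny, h3⟩ : ∃ m, PySem.List.min? (bc.map Prod.snd) (fun v : Int => v) = some m := by
      cases e : PySem.List.min? (bc.map Prod.snd) (fun v : Int => v) with
      | none => exact absurd ((PySem.List.min?_eq_none_iff _ _).1 e) hy
      | some m => exact ⟨m, rfl⟩
    obtain ⟨mxy, h4⟩ : ∃ m, PySem.List.max? (bc.map Prod.snd) (fun v : Int => v) = some m := by
      cases e : PySem.List.max? (bc.map Prod.snd) (fun v : Int => v) with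
      | none => exact absurd ((PySem.List.max?_eq_none_iff _ _).1 e) hy
      | some m => exact ⟨m, rfl⟩
    rw [h1, h2, h3, h4]
    show _ = if mnx < cx ∨ mxx > cx + cw ∨ mny < cy ∨ mxy > cy + ch then none
      else some (bc.map fun p => (p.1 - cx, p.2 - cy))
    have hb := bbox_iff bc cx cy (cx + cw) (cy + ch) mnx mxx mny mxy h1 h2 h3 h4
    by_cases hc : mnx < cx ∨ mxx > cx + cw ∨ mny < cy ∨ mxy > cy + ch
    · rw [if_pos hc, if_neg]
      simp only [hb]
      exact fun h => h hc
    · rw [if_neg hc, if_pos (hb.2 hc)]
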